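-- pv_equiv track=rewrite | github.com/maria-genishta/autocompleter | autocompleter_mac4.py | split_tokens_to_phrases
-- ===== SOURCE A (Python) =====
-- from typing import List
--
-- def split_tokens_to_phrases(tokens: List[str], stoplist: List[str]) -> List[str]:
--     """
--     Функция получает на вход список токенов tokens и список разделителей stoplist,
--     а возвращает список фраз.
--     Фраза -- такой набор токенов, что
--     - фраза содержит несколько токенов (>0), идущих в списке tokens подряд
--     - фраза не содержит разделителей
--     - перед фразой стоит разделитель из stoplist или начало списка tokens
--     - после фразы стоит разделитель из stoplist или конец списка tokens
--
--     Если простыми словами, нужно сложить слова в словосочетаниями,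
--     а границами этих словосочетаний являются элементы stoplist
--     Example:
--     split_tokens_to_phrases(
--         tokens=["Mary", "and", "John", ",", "some", "words", "(", "and", "other", "words", ")"],
--         stoplist=["and", ",", ".", "(", ")"]) ->
--     -> ["Mary", "John", "some words", "other words"]
--     """
--     phrases = []
--     phrase = []
--     for word in tokens:
--         if word.lower() in stoplist:
--             if phrase:
--                 phrases.append(' '.join(phrase))
--             phrase = []
--         else:
--             phrase.append(word)
--     if phrase:
--         phrases.append(' '.join(phrase))
--     return phrases
-- ===== SOURCE B (Python) =====
-- from typing import List
--
-- def split_tokens_to_phrases(tokens: List[str], stoplist: List[str]) -> List[str]: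
--     # Two-pointer / slice-based scan: instead of accumulating a phrase buffer and
--     # flushing it at each separator, skip separators and cut out each maximal
--     # run of non-separator tokens in one slice.
--     def is_stop(w: str) -> bool:
--         return w.lower() in stoplist
--
--     phrases = []
--     rest = tokens
--     while rest:
--         head, rest = rest[0], rest[1:]
--         if is_stop(head):
--             continue
--         k = 0
--         while k < len(rest) and not is_stop(rest[k]):
--             k += 1
--         phrases.append(' '.join([head] + rest[:k]))
--         rest = rest[k:]
--     return phrases
-- ===== Notes on version B (the rewrite author's own statement) =====
-- stated objective: alternative
-- what changed: Replaced the phrase-accumulator-with-flush loop by a slice-based scan that skips separators and cuts out each maximal run of non-separator tokens with a span length and two slices.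
import Mathlib
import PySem

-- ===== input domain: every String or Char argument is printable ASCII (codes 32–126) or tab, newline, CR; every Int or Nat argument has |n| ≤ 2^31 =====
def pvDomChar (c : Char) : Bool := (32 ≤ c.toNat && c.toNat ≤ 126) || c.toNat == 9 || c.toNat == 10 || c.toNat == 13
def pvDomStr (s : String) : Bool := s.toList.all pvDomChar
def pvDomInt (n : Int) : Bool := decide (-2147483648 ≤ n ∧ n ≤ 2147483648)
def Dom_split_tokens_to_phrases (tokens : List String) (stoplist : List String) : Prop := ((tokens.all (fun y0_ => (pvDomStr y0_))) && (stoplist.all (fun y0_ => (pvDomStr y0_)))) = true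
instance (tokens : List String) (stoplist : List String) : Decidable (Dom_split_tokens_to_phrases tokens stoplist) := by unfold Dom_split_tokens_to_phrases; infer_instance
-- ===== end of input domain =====

-- B replaces A's phrase-accumulator/flush loop by a slice-based scan that skips
-- separators and cuts out each maximal non-separator run (objective: alternative).

-- ===== PORT A =====
-- loop body of A's single for-loop, as a named step function
def pvStepA (stoplist : List String) (st : List String × List String) (word : String) : List String × List String :=
  if stoplist.contains (PySem.Str.lower word) then
    (if st.2 ≠ [] then st.1 ++ [PySem.Str.join " " st.2] else st.1, [])
  else (st.1, st.2 ++ [word])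

def split_tokens_to_phrases (tokens : List String) (stoplist : List String) : List String :=
  let st := tokens.foldl (pvStepA stoplist) ([], [])
  if st.2 ≠ [] then st.1 ++ [PySem.Str.join " " st.2] else st.1

-- ===== PORT B =====
def pvIsStop (stoplist : List String) (w : String) : Bool :=
  stoplist.contains (PySem.Str.lower w)

-- B's inner while loop: length of the maximal non-separator prefix
def pvSpanLen (stoplist : List String) : List String → Nat
  | [] => 0
  | w :: ws => if pvIsStop stoplist w then 0 else pvSpanLen stoplist ws + 1

def split_tokens_to_phrases_alt (tokens : List String) (stoplist : List String) : List String :=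
  match tokens with
  | [] => []
  | head :: rest =>
    if pvIsStop stoplist head then split_tokens_to_phrases_alt rest stoplist
    else
      let k := pvSpanLen stoplist rest
      PySem.Str.join " " (head :: rest.take k) :: split_tokens_to_phrases_alt (rest.drop k) stoplist
termination_by tokens.length
decreasing_by
  · simp
  · simp [List.length_drop]

-- ===== PRECONDITION & SPEC =====
def Spec_split_tokens_to_phrases (tokens : List String) (stoplist : List String) (out : List String) : Prop := out = split_tokens_to_phrases_alt tokens stoplist
instance (tokens : List String) (stoplist : List String) (out : List String) : Decidable (Spec_split_tokens_to_phrases tokens stoplist out) := by unfold Spec_split_tokens_to_phrases; infer_instance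

-- ===== CLAIM (what is proved, stated in full; the proofs are below) =====
def Claim_equal_split_tokens_to_phrases : Prop := ∀ (tokens : List String) (stoplist : List String), Dom_split_tokens_to_phrases tokens stoplist → Spec_split_tokens_to_phrases tokens stoplist (split_tokens_to_phrases tokens stoplist)

-- ===== LEMMAS AND PROOFS =====
-- A's final flush, as a function of the loop state
def pvFlush (st : List String × List String) : List String :=
  if st.2 ≠ [] then st.1 ++ [PySem.Str.join " " st.2] else st.1

theorem flush_foldl_prepend (stoplist : List String) :
    ∀ (ws : List String) (acc cur : List String),
      pvFlush (ws.foldl (pvStepA stoplist) (acc, cur))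
        = acc ++ pvFlush (ws.foldl (pvStepA stoplist) ([], cur)) := by
  intro ws
  induction ws with
  | nil => intro acc cur; simp only [List.foldl_nil, pvFlush]; split <;> simp
  | cons w ws ih =>
    intro acc cur
    by_cases h : stoplist.contains (PySem.Str.lower w)
    · simp only [List.foldl_cons, pvStepA, h, if_true]
      rw [ih, ih (if cur ≠ [] then [] ++ [PySem.Str.join " " cur] else [])]
      split <;> simp
    · simp only [List.foldl_cons, pvStepA, h, Bool.false_eq_true, if_false]
      exact ih acc (cur ++ [w])

theorem foldl_eq_alt (stoplist : List String) :
    ∀ (ws : List String),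
      (pvFlush (ws.foldl (pvStepA stoplist) ([], [])) = split_tokens_to_phrases_alt ws stoplist)
      ∧ (∀ cur : List String, cur ≠ [] →
          pvFlush (ws.foldl (pvStepA stoplist) ([], cur))
            = PySem.Str.join " " (cur ++ ws.take (pvSpanLen stoplist ws))
              :: split_tokens_to_phrases_alt (ws.drop (pvSpanLen stoplist ws)) stoplist) := by
  intro ws
  induction ws with
  | nil =>
    constructor
    · simp [pvFlush, split_tokens_to_phrases_alt]
    · intro cur hcur; simp [pvFlush, hcur, split_tokens_to_phrases_alt]
  | cons w ws ih =>
    have halt : split_tokens_to_phrases_alt (w :: ws) stoplist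
        = if pvIsStop stoplist w then split_tokens_to_phrases_alt ws stoplist
          else PySem.Str.join " " (w :: ws.take (pvSpanLen stoplist ws))
            :: split_tokens_to_phrases_alt (ws.drop (pvSpanLen stoplist ws)) stoplist := by
      rw [split_tokens_to_phrases_alt]
    by_cases h : pvIsStop stoplist w
    · have h' : stoplist.contains (PySem.Str.lower w) = true := h
      constructor
      · simp only [List.foldl_cons, pvStepA, h', if_true, ne_eq, not_true_eq_false,
          if_false]
        rw [ih.1, halt]
        simp [h]
      · intro cur hcur
        simp only [List.foldl_cons, pvStepA, h', if_true, hcur, ne_eq, not_false_eq_true]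
        rw [flush_foldl_prepend, ih.1]
        rw [show pvSpanLen stoplist (w :: ws) = 0 by simp [pvSpanLen, h]]
        simp only [List.take_zero, List.drop_zero]
        rw [halt]
        simp [h]
    · have h' : stoplist.contains (PySem.Str.lower w) = false := by
        simpa [pvIsStop] using h
      have hspan : pvSpanLen stoplist (w :: ws) = pvSpanLen stoplist ws + 1 := by
        simp [pvSpanLen, h]
      constructor
      · simp only [List.foldl_cons, pvStepA, h', Bool.false_eq_true, if_false,
          List.nil_append]
        rw [(ih.2 [w] (by simp))]
        rw [halt]
        simp [h]
      · intro cur hcur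
        simp only [List.foldl_cons, pvStepA, h', Bool.false_eq_true, if_false]
        rw [(ih.2 (cur ++ [w]) (by simp))]
        rw [hspan]
        simp

-- ===== VERDICT (by name: the statement is the Claim_ definition above) =====
theorem split_tokens_to_phrases_spec : Claim_equal_split_tokens_to_phrases := by
  intro tokens stoplist _
  show split_tokens_to_phrases tokens stoplist = split_tokens_to_phrases_alt tokens stoplist
  have := (foldl_eq_alt stoplist tokens).1
  simpa [split_tokens_to_phrases, pvFlush] using this
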